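-- pv_equiv track=rewrite | github.com/thomaxius-and-co/lemon_bot_discord | src/columnmaker.py | columnmaker
-- ===== SOURCE A (Python) =====
-- def columnmaker(titles,data):
--
--     def column_width(rows, index):
--         """Returns the width of the widest value in column"""
--         return max([len(str(row[index])) for row in rows])
--
--     def format_row(row, column_widths):
--         """Formats a single row"""
--         width_adjusted = [ str(data).ljust(width) for data, width in zip(row, column_widths) ]
--         return " | ".join(width_adjusted)
--
--     def format_table(rows):
--         """Formats table"""
--         if not rows or len(rows) < 1:
--             raise ValueError("Table should have at least one row")
--
--         column_count = len(rows[0])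
--         if not all([ len(row) == column_count for row in rows ]):
--             raise ValueError("All rows should have same amount of columns")
--
--         column_widths = [ column_width(rows, index) for index in range(0, column_count) ]
--         formatted_row = [ format_row(row, column_widths) for row in rows ]
--
--         return "\n".join(formatted_row)
--
--     table = format_table([(titles),*data])
--     return table
-- ===== SOURCE B (Python) =====
-- def columnmaker(titles, data):
--     rows = [titles, *data]
--     n = len(titles)
--     if any(len(row) != n for row in rows):
--         raise ValueError("All rows should have same amount of columns")
--     widths = [0] * n
--     for row in rows:
--         widths = [max(w, len(str(c))) for w, c in zip(widths, row)]
--     lines = [" | ".join(str(c).ljust(w) for c, w in zip(row, widths)) for row in rows]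
--     return "\n".join(lines)
-- ===== Notes on version B (the rewrite author's own statement) =====
-- stated objective: alternative
-- what changed: Column widths are computed in a single index-free row-major pass (a running zipWith-max fold over the rows) instead of one separate column-major max scan per column index; lines are then built directly from zips with no index arithmetic anywhere.
import Mathlib
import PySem

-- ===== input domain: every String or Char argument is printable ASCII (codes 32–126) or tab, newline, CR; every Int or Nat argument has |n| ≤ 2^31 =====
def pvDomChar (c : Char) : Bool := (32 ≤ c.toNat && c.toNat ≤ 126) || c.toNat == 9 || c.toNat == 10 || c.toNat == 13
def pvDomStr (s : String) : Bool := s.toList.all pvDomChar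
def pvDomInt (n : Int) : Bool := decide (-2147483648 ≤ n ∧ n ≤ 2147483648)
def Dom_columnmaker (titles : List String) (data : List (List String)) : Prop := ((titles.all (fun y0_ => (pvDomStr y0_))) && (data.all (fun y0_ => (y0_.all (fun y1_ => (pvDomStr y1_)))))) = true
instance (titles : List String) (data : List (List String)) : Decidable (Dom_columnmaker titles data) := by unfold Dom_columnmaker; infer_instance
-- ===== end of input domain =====

-- B computes the column widths in one index-free row-major zipWith-max pass instead of
-- A's per-column max scans; return values agree on all inputs where A returns (Pre_).

-- str.ljust(w): pad on the right with spaces to width w (exact; no-op when w ≤ len)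
def pyLjust (s : String) (w : Int) : String :=
  String.ofList (s.toList ++ List.replicate (w - (s.toList.length : Int)).toNat ' ')

-- ===== PORT A =====
-- max([len(str(row[index])) for row in rows])
def columnWidthA (rows : List (List String)) (index : Int) : Int :=
  (PySem.List.max? (rows.map (fun row => PySem.Str.len (PySem.List.pyGetD row index "")))
    (fun x => x)).getD 0

-- " | ".join([str(data).ljust(width) for data, width in zip(row, column_widths)])
def formatRowA (row : List String) (widths : List Int) : String :=
  PySem.Str.join " | " ((row.zip widths).map (fun p => pyLjust p.1 p.2))

def columnmaker (titles : List String) (data : List (List String)) : String :=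
  let rows := titles :: data
  if rows.length < 1 then ""  -- raise ValueError("Table should have at least one row"); unreachable: rows is nonempty
  else
    let columnCount := (PySem.List.pyGetD rows 0 ([] : List String)).length
    if ¬ (rows.all (fun row => row.length == columnCount)) then ""  -- raise ValueError("All rows should have same amount of columns"); excluded by Pre_
    else
      let columnWidths := (PySem.List.pyRange 0 (columnCount : Int) 1).map (fun i => columnWidthA rows i)
      PySem.Str.join "\n" (rows.map (fun row => formatRowA row columnWidths))

-- ===== PORT B =====
def columnmaker_alt (titles : List String) (data : List (List String)) : String :=
  let rows := titles :: data
  let n := titles.length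
  if rows.any (fun row => row.length != n) then ""  -- raise ValueError("All rows should have same amount of columns"); excluded by Pre_
  else
    let widths := rows.foldl
      (fun ws row => List.zipWith (fun w c => max w (PySem.Str.len c)) ws row)
      (List.replicate n (0 : Int))
    PySem.Str.join "\n"
      (rows.map (fun row => PySem.Str.join " | " (List.zipWith (fun c w => pyLjust c w) row widths)))

-- ===== PRECONDITION & SPEC =====
-- Pre_ excludes exactly the inputs where A (and B) raise ValueError: a data row whose
-- length differs from len(titles).
def Pre_columnmaker (titles : List String) (data : List (List String)) : Prop :=
  ∀ row ∈ data, row.length = titles.length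
instance (titles : List String) (data : List (List String)) : Decidable (Pre_columnmaker titles data) := by unfold Pre_columnmaker; infer_instance

def pvWitness_columnmaker : List String × List (List String) :=
  (["id", "name"], [["1", "alice"], ["22", "b"]])

def Spec_columnmaker (titles : List String) (data : List (List String)) (out : String) : Prop := out = columnmaker_alt titles data
instance (titles : List String) (data : List (List String)) (out : String) : Decidable (Spec_columnmaker titles data out) := by unfold Spec_columnmaker; infer_instance

-- ===== CLAIM (what is proved, stated in full; the proofs are below) =====
def Claim_equal_columnmaker : Prop := ∀ (titles : List String) (data : List (List String)), Dom_columnmaker titles data → Pre_columnmaker titles data → Spec_columnmaker titles data (columnmaker titles data)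

-- ===== LEMMAS AND PROOFS =====

-- max? over Int with identity key is a foldl of max
def stepB (ws : List Int) (row : List String) : List Int :=
  List.zipWith (fun w c => max w (PySem.Str.len c)) ws row

lemma stepB_length (ws : List Int) (row : List String) (h : row.length = ws.length) :
    (stepB ws row).length = ws.length := by
  simp [stepB, h]

lemma foldl_stepB_length (rows : List (List String)) (ws : List Int)
    (h : ∀ r ∈ rows, r.length = ws.length) :
    (rows.foldl stepB ws).length = ws.length := by
  induction rows generalizing ws with
  | nil => rfl
  | cons r rows ih =>
      have hr := h r (List.mem_cons_self ..)
      have := ih (stepB ws r) (by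
        intro r' hr'
        rw [stepB_length ws r hr]
        exact h r' (List.mem_cons_of_mem _ hr'))
      simp only [List.foldl_cons, this, stepB_length ws r hr]

lemma foldl_stepB_getElem (rows : List (List String)) (ws : List Int) (j : Nat)
    (hj : j < ws.length) (h : ∀ r ∈ rows, r.length = ws.length) :
    (rows.foldl stepB ws)[j]? =
      some (rows.foldl (fun a r => max a (PySem.Str.len (r.getD j ""))) ws[j]) := by
  induction rows generalizing ws with
  | nil => simp [hj]
  | cons r rows ih =>
      have hr := h r (List.mem_cons_self ..)
      have hlen : (stepB ws r).length = ws.length := stepB_length ws r hr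
      have hj' : j < (stepB ws r).length := by omega
      have := ih (stepB ws r) (by rw [hlen]; omega) (by
        intro r' hr'
        rw [hlen]; exact h r' (List.mem_cons_of_mem _ hr'))
      simp only [List.foldl_cons]
      rw [this]
      congr 2
      simp only [stepB, List.getElem_zipWith]
      congr 1
      rw [List.getD_eq_getElem?_getD, List.getElem?_eq_getElem (show j < r.length by omega)]
      rfl

lemma zip_map_eq_zipWith (row : List String) (ws : List Int) :
    (row.zip ws).map (fun p => pyLjust p.1 p.2) = List.zipWith (fun c w => pyLjust c w) row ws := by
  induction row generalizing ws with
  | nil => rfl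
  | cons c row ih =>
      cases ws with
      | nil => rfl
      | cons w ws => simp [ih]

-- the central lemma: A's per-column widths list equals B's fold of zipWith-max
lemma widths_eq (t : List String) (d : List (List String))
    (h : ∀ r ∈ d, r.length = t.length) :
    (PySem.List.pyRange 0 (t.length : Int) 1).map (fun i => columnWidthA (t :: d) i)
      = (t :: d).foldl stepB (List.replicate t.length (0 : Int)) := by
  apply List.ext_getElem?
  intro j
  by_cases hj : j < t.length
  · -- both sides are in range
    have hlenL : ((PySem.List.pyRange 0 (t.length : Int) 1).map (fun i => columnWidthA (t :: d) i)).length = t.length := by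
      simp [PySem.List.length_pyRange_one]
    have hAll : ∀ r ∈ (t :: d), r.length = (List.replicate t.length (0 : Int)).length := by
      intro r hr
      rcases List.mem_cons.mp hr with h1 | h2
      · simp [h1]
      · simp [h r h2]
    rw [List.getElem?_eq_getElem (by omega : j < _)]
    rw [foldl_stepB_getElem (t :: d) _ j (by simp [hj]) hAll]
    simp only [List.getElem_map, PySem.List.getElem_pyRange_one, zero_add]
    congr 1
    -- A's column width at column j equals B's inner fold
    simp only [columnWidthA, List.map_cons]
    have hget : ∀ r : List String, r.length = t.length →
        PySem.List.pyGetD r (j : Int) "" = r.getD j "" := by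
      intro r _
      simp [PySem.List.pyGetD]
    rw [hget t rfl]
    have hmapd : d.map (fun row => PySem.Str.len (PySem.List.pyGetD row (j : Int) "")) =
        d.map (fun row => PySem.Str.len (row.getD j "")) := by
      apply List.map_congr_left
      intro r hr
      rw [hget r (h r hr)]
    rw [hmapd, PySem.List.max?_id_cons, Option.getD_some, List.foldl_map]
    simp only [List.foldl_cons, List.getElem_replicate]
    congr 1
  · -- both sides out of range
    have h1 : ((PySem.List.pyRange 0 (t.length : Int) 1).map (fun i => columnWidthA (t :: d) i)).length = t.length := by
      simp [PySem.List.length_pyRange_one]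
    have h2 : ((t :: d).foldl stepB (List.replicate t.length (0 : Int))).length = t.length := by
      have := foldl_stepB_length (t :: d) (List.replicate t.length (0 : Int)) (by
        intro r hr
        rcases List.mem_cons.mp hr with ha | hb
        · simp [ha]
        · simp [h r hb])
      simpa using this
    rw [List.getElem?_eq_none (by omega), List.getElem?_eq_none (by omega)]

-- ===== VERDICT (by name: the statement is the Claim_ definition above) =====
theorem columnmaker_spec : Claim_equal_columnmaker := by
  intro t d _ hpre
  unfold Spec_columnmaker columnmaker columnmaker_alt
  have hhead : PySem.List.pyGetD (t :: d) 0 ([] : List String) = t := by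
    simp [PySem.List.pyGetD]
  have hguardA : (t :: d).all (fun row => row.length == t.length) = true := by
    simp only [List.all_eq_true]
    intro r hr
    rcases List.mem_cons.mp hr with h1 | h2
    · simp [h1]
    · simp [hpre r h2]
  have hguardB : (t :: d).any (fun row => row.length != t.length) = false := by
    simp only [List.any_eq_false]
    intro r hr
    rcases List.mem_cons.mp hr with h1 | h2
    · simp [h1]
    · simp [hpre r h2]
  simp only [List.length_cons, hhead, hguardA, hguardB, not_true, Bool.false_eq_true,
    if_false]
  rw [if_neg (by omega : ¬ d.length + 1 < 1)]
  rw [widths_eq t d hpre]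
  rw [show stepB = (fun ws row => List.zipWith (fun w c => max w (PySem.Str.len c)) ws row) from rfl]
  apply congrArg
  apply List.map_congr_left
  intro r _
  simp only [formatRowA]
  rw [zip_map_eq_zipWith]
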